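-- pv_equiv track=rewrite | github.com/VaultSovereign/ops | scripts/pr_summary.py | collect_area_impacts
-- ===== SOURCE A (Python) =====
-- from typing import Dict, Iterable, List, Optional, Sequence, Tuple
--
-- def collect_area_impacts(changed: Sequence[Dict]) -> Tuple[Dict[str, List[str]], set[str]]:
--     impacts = {"docs": [], "prompts": [], "ops_mcp": [], "schema": []}
--     labels: set[str] = set()
--     for item in changed:
--         path = item["filename"]
--         if path.startswith("docs/"):
--             impacts["docs"].append(path)
--             labels.add("area:docs")
--         if path.startswith("prompts/"):
--             impacts["prompts"].append(path)
--             labels.add("area:prompts")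
--         if path.startswith("scripts/ops_mcp/"):
--             impacts["ops_mcp"].append(path)
--             labels.add("ops:mcp")
--         if path.endswith(".schema.json"):
--             impacts["schema"].append(path)
--             labels.add("type:schema")
--     return impacts, labels
-- ===== SOURCE B (Python) =====
-- from typing import Dict, Iterable, List, Optional, Sequence, Tuple
--
-- # B: data-driven rules table; buckets built by independent per-rule filters over
-- # the extracted paths, labels accumulated by a separate rules-loop pass.
-- RULES = [
--     (lambda p: p.startswith("docs/"), "docs", "area:docs"),
--     (lambda p: p.startswith("prompts/"), "prompts", "area:prompts"),
--     (lambda p: p.startswith("scripts/ops_mcp/"), "ops_mcp", "ops:mcp"),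
--     (lambda p: p.endswith(".schema.json"), "schema", "type:schema"),
-- ]
--
-- def collect_area_impacts(changed):
--     paths = [item["filename"] for item in changed]
--     impacts = {key: [p for p in paths if pred(p)] for pred, key, _ in RULES}
--     labels = set()
--     for p in paths:
--         for pred, _, label in RULES:
--             if pred(p):
--                 labels.add(label)
--     return impacts, labels
-- ===== Notes on version B (the rewrite author's own statement) =====
-- stated objective: idiomatic
-- what changed: Replaces the per-item four-branch dict/set mutation loop with a declarative rules table: paths are extracted once, each bucket is an independent filter over the paths per rule, and labels come from a separate rules-driven pass.
import Mathlib
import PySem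

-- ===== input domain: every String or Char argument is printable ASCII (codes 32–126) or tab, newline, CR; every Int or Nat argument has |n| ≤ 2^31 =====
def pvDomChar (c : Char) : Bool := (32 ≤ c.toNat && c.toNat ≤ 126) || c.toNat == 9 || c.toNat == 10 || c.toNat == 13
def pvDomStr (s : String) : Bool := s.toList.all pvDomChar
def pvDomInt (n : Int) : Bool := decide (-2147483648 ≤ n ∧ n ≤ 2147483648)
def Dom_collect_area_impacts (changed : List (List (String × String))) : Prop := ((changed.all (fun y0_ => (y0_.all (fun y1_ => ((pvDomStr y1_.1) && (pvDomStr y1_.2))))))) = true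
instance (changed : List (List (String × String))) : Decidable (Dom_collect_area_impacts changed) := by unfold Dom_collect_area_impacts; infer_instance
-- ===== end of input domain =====

-- B is a data-driven rules table + per-rule filters; A is a per-item four-branch mutation loop.
-- Equivalence is about the RETURN value; Pre_ excludes items missing the "filename" key (both raise KeyError there).

-- ===== PORT A =====
-- loop body of A, transcribed step for step (helper for the fold)
def pvStepA (st : PySem.Dict String (List String) × PySem.Set String)
    (item : List (String × String)) : PySem.Dict String (List String) × PySem.Set String :=
  let path := ((PySem.Dict.mk item).get? "filename").getD ""
  let st := if PySem.Str.startswith path "docs/" then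
      (st.1.modify "docs" [] (· ++ [path]), PySem.Set.add st.2 "area:docs") else st
  let st := if PySem.Str.startswith path "prompts/" then
      (st.1.modify "prompts" [] (· ++ [path]), PySem.Set.add st.2 "area:prompts") else st
  let st := if PySem.Str.startswith path "scripts/ops_mcp/" then
      (st.1.modify "ops_mcp" [] (· ++ [path]), PySem.Set.add st.2 "ops:mcp") else st
  let st := if PySem.Str.endswith path ".schema.json" then
      (st.1.modify "schema" [] (· ++ [path]), PySem.Set.add st.2 "type:schema") else st
  st

def collect_area_impacts (changed : List (List (String × String))) : (List (String × List String)) × List String :=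
  let init : PySem.Dict String (List String) :=
    PySem.Dict.ofList [("docs", []), ("prompts", []), ("ops_mcp", []), ("schema", [])]
  let st := changed.foldl pvStepA (init, PySem.Set.empty)
  (st.1.items, st.2)

-- ===== PORT B =====
def pvRules : List ((String → Bool) × String × String) :=
  [ (fun p => PySem.Str.startswith p "docs/", "docs", "area:docs"),
    (fun p => PySem.Str.startswith p "prompts/", "prompts", "area:prompts"),
    (fun p => PySem.Str.startswith p "scripts/ops_mcp/", "ops_mcp", "ops:mcp"),
    (fun p => PySem.Str.endswith p ".schema.json", "schema", "type:schema") ]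

def collect_area_impacts_alt (changed : List (List (String × String))) : (List (String × List String)) × List String :=
  let paths := changed.map (fun item => ((PySem.Dict.mk item).get? "filename").getD "")
  let impacts := pvRules.map (fun r => (r.2.1, paths.filter r.1))
  let labels := paths.foldl (fun s p =>
    pvRules.foldl (fun s r => if r.1 p then PySem.Set.add s r.2.2 else s) s) PySem.Set.empty
  (impacts, labels)

-- ===== PRECONDITION & SPEC =====
-- Pre_ excludes items without a "filename" key, on which A raises KeyError.
def Pre_collect_area_impacts (changed : List (List (String × String))) : Prop :=
  ∀ item ∈ changed, ((PySem.Dict.mk item).get? "filename").isSome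
instance (changed : List (List (String × String))) : Decidable (Pre_collect_area_impacts changed) := by unfold Pre_collect_area_impacts; infer_instance
def pvWitness_collect_area_impacts : (List (List (String × String))) := [[("filename", "docs/a.md")], [("filename", "x.schema.json")]]
def Spec_collect_area_impacts (changed : List (List (String × String))) (out : (List (String × List String)) × List String) : Prop := out = collect_area_impacts_alt changed
instance (changed : List (List (String × String))) (out : (List (String × List String)) × List String) : Decidable (Spec_collect_area_impacts changed out) := by unfold Spec_collect_area_impacts; infer_instance

-- ===== CLAIM (what is proved, stated in full; the proofs are below) =====
def Claim_equal_collect_area_impacts : Prop := ∀ (changed : List (List (String × String))), Dom_collect_area_impacts changed → Pre_collect_area_impacts changed → Spec_collect_area_impacts changed (collect_area_impacts changed)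

-- ===== LEMMAS AND PROOFS =====

theorem pvStepA_eq (l1 l2 l3 l4 : List String) (s : PySem.Set String)
    (item : List (String × String)) :
    pvStepA (PySem.Dict.mk [("docs", l1), ("prompts", l2), ("ops_mcp", l3), ("schema", l4)], s) item
    = (let p := ((PySem.Dict.mk item).get? "filename").getD ""
       (PySem.Dict.mk
         [("docs", l1 ++ if PySem.Str.startswith p "docs/" then [p] else []),
          ("prompts", l2 ++ if PySem.Str.startswith p "prompts/" then [p] else []),
          ("ops_mcp", l3 ++ if PySem.Str.startswith p "scripts/ops_mcp/" then [p] else []),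
          ("schema", l4 ++ if PySem.Str.endswith p ".schema.json" then [p] else [])],
       pvRules.foldl (fun s r => if r.1 p then PySem.Set.add s r.2.2 else s) s)) := by
  unfold pvStepA
  set p := ((PySem.Dict.mk item).get? "filename").getD "" with hp
  by_cases h1 : PySem.Str.startswith p "docs/" <;>
  by_cases h2 : PySem.Str.startswith p "prompts/" <;>
  by_cases h3 : PySem.Str.startswith p "scripts/ops_mcp/" <;>
  by_cases h4 : PySem.Str.endswith p ".schema.json" <;>
    simp at h1 h2 h3 h4 <;>
    simp [h1, h2, h3, h4, pvRules, PySem.Dict.modify, PySem.Dict.insert,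
      PySem.Dict.getD, PySem.Dict.get?, PySem.Dict.contains]

theorem collect_area_impacts_main (changed : List (List (String × String)))
    (l1 l2 l3 l4 : List String) (s : PySem.Set String) :
    changed.foldl pvStepA (PySem.Dict.mk [("docs", l1), ("prompts", l2), ("ops_mcp", l3), ("schema", l4)], s)
    =
    (PySem.Dict.mk
      [("docs", l1 ++ (changed.map (fun item => ((PySem.Dict.mk item).get? "filename").getD "")).filter (fun p => PySem.Str.startswith p "docs/")),
       ("prompts", l2 ++ (changed.map (fun item => ((PySem.Dict.mk item).get? "filename").getD "")).filter (fun p => PySem.Str.startswith p "prompts/")),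
       ("ops_mcp", l3 ++ (changed.map (fun item => ((PySem.Dict.mk item).get? "filename").getD "")).filter (fun p => PySem.Str.startswith p "scripts/ops_mcp/")),
       ("schema", l4 ++ (changed.map (fun item => ((PySem.Dict.mk item).get? "filename").getD "")).filter (fun p => PySem.Str.endswith p ".schema.json"))],
     (changed.map (fun item => ((PySem.Dict.mk item).get? "filename").getD "")).foldl (fun s p =>
       pvRules.foldl (fun s r => if r.1 p then PySem.Set.add s r.2.2 else s) s) s) := by
  induction changed generalizing l1 l2 l3 l4 s with
  | nil => simp
  | cons item rest ih =>
    rw [List.foldl_cons, pvStepA_eq, ih]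
    simp only [List.map_cons, List.filter_cons, List.foldl_cons]
    split_ifs <;> simp [List.append_assoc]

-- ===== VERDICT (by name: the statement is the Claim_ definition above) =====
theorem collect_area_impacts_spec : Claim_equal_collect_area_impacts := by
  intro changed _ _
  unfold Spec_collect_area_impacts collect_area_impacts collect_area_impacts_alt
  dsimp only
  rw [show (PySem.Dict.ofList [("docs", ([] : List String)), ("prompts", []), ("ops_mcp", []), ("schema", [])]) = PySem.Dict.mk [("docs", []), ("prompts", []), ("ops_mcp", []), ("schema", [])] from by decide]
  rw [show (PySem.Set.empty : PySem.Set String) = [] from rfl]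
  rw [collect_area_impacts_main]
  simp [pvRules]
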